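-- pv_equiv track=rewrite | github.com/aciderix/Graph-Systems-Exploration | numerical_semigroups/kunz_wilf_verification/phases/run_chunks.py | valid_prefixes
-- ===== SOURCE A (Python) =====
-- def valid_prefixes(K_max: int, plen: int) -> list[tuple[int, ...]]:
--     """All Kunz prefixes (k_1, ..., k_plen) compatible with the no-carry
--     forward checks (k_r <= k_a + k_b for a+b=r within the prefix)."""
--     out: list[tuple[int, ...]] = []
--
--     def rec(p: list[int]) -> None:
--         if len(p) == plen:
--             out.append(tuple(p))
--             return
--         r = len(p) + 1
--         ub = K_max
--         for a in range(1, r):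
--             b = r - a
--             v = p[a - 1] + p[b - 1]
--             if v < ub:
--                 ub = v
--         for v in range(1, ub + 1):
--             p.append(v)
--             rec(p)
--             p.pop()
--
--     rec([])
--     return out
-- ===== SOURCE B (Python) =====
-- def valid_prefixes(K_max: int, plen: int) -> list[tuple[int, ...]]:
--     """Level-by-level enumeration: extend every valid prefix of length r to
--     length r+1, plen times; list order stays lexicographic."""
--     if plen < 0:
--         return []
--     prefixes = [()]
--     for _ in range(plen):
--         if not prefixes:
--             return []
--         nxt = []
--         for p in prefixes:
--             r = len(p)
--             ub = min([K_max] + [p[a] + p[r - 1 - a] for a in range(r)])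
--             nxt.extend(p + (v,) for v in range(1, ub + 1))
--         prefixes = nxt
--     return prefixes
-- ===== Notes on version B (the rewrite author's own statement) =====
-- stated objective: alternative
-- what changed: Replaces the depth-first recursion with a single iterative level-by-level loop that extends all valid prefixes of length r to length r+1 at once, plen times; the output order (lexicographic) is preserved.
import Mathlib
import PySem

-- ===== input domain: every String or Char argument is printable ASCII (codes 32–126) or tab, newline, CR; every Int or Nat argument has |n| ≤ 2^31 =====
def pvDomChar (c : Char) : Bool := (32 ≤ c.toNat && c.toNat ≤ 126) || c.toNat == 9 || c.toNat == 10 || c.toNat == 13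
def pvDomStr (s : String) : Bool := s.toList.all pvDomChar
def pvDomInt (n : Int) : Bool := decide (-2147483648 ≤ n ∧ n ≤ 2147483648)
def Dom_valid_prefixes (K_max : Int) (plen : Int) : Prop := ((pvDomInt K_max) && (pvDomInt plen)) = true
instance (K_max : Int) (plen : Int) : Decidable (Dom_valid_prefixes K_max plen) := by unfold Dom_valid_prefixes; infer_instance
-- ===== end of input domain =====

-- B replaces A's depth-first recursion by an iterative level-by-level extension loop
-- (same output, same cost; objective: alternative decomposition).

-- ===== PORT A =====
-- the inner 'for a in range(1, r): … if v < ub: ub = v' loop of rec (indices are always in range, so pyGetD _ _ 0 is exact)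
def vpUbA (K_max : Int) (p : List Int) : Int :=
  (PySem.List.pyRange 1 ((p.length : Int) + 1) 1).foldl
    (fun ub a =>
      let b := ((p.length : Int) + 1) - a
      let v := PySem.List.pyGetD p (a - 1) 0 + PySem.List.pyGetD p (b - 1) 0
      if v < ub then v else ub) K_max

-- the recursive helper 'rec'; the final 'else []' branch is a totality guard only:
-- it is reached only when p.length > plen (possible only off Pre_, where Python diverges
-- or, with K_max ≤ 0, never pushes past the empty prefix and returns []).
def vpRec (K_max : Int) (plen : Int) (p : List Int) : List (List Int) :=
  if ((p.length : Int) = plen) then [p]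
  else if ((p.length : Int) < plen) then
    (PySem.List.pyRange 1 (vpUbA K_max p + 1) 1).foldl
      (fun out v => out ++ vpRec K_max plen (p ++ [v])) []
  else []
termination_by (plen - (p.length : Int)).toNat
decreasing_by simp; omega

def valid_prefixes (K_max : Int) (plen : Int) : List (List Int) :=
  vpRec K_max plen []

-- ===== PORT B =====
-- ub = min([K_max] + [p[a] + p[r-1-a] for a in range(r)]) — the list is nonempty, so .getD 0 is exact
def vpUbB (K_max : Int) (p : List Int) : Int :=
  (PySem.List.min?
    (K_max :: (PySem.List.pyRange 0 (p.length : Int) 1).map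
      (fun a => PySem.List.pyGetD p a 0 + PySem.List.pyGetD p ((p.length : Int) - 1 - a) 0))
    (fun x => x)).getD 0

-- one pass of the 'for p in prefixes: nxt.extend(…)' body
def vpStep (K_max : Int) (L : List (List Int)) : List (List Int) :=
  L.flatMap (fun p =>
    (PySem.List.pyRange 1 (vpUbB K_max p + 1) 1).map (fun v => p ++ [v]))

-- the 'for _ in range(plen)' loop with its 'if not prefixes: return []' early exit
def vpGo (K_max : Int) : List Int → List (List Int) → List (List Int)
  | [], L => L
  | _ :: rest, L => if L = [] then [] else vpGo K_max rest (vpStep K_max L)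

def valid_prefixes_alt (K_max : Int) (plen : Int) : List (List Int) :=
  if plen < 0 then []
  else vpGo K_max (PySem.List.pyRange 0 plen 1) [[]]

-- ===== PRECONDITION & SPEC =====
-- Pre_ excludes only plen < 0 with K_max ≥ 1, where A's recursion never terminates (RecursionError).
def Pre_valid_prefixes (K_max : Int) (plen : Int) : Prop := 0 ≤ plen ∨ K_max ≤ 0
instance (K_max : Int) (plen : Int) : Decidable (Pre_valid_prefixes K_max plen) := by unfold Pre_valid_prefixes; infer_instance
def pvWitness_valid_prefixes : Int × Int := (3, 3)

def Spec_valid_prefixes (K_max : Int) (plen : Int) (out : List (List Int)) : Prop := out = valid_prefixes_alt K_max plen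
instance (K_max : Int) (plen : Int) (out : List (List Int)) : Decidable (Spec_valid_prefixes K_max plen out) := by unfold Spec_valid_prefixes; infer_instance

-- ===== CLAIM (what is proved, stated in full; the proofs are below) =====
def Claim_equal_valid_prefixes : Prop := ∀ (K_max : Int) (plen : Int), Dom_valid_prefixes K_max plen → Pre_valid_prefixes K_max plen → Spec_valid_prefixes K_max plen (valid_prefixes K_max plen)
-- ===== LEMMAS AND PROOFS =====

-- the two upper-bound computations agree
lemma ub_eq (K_max : Int) (p : List Int) : vpUbA K_max p = vpUbB K_max p := by
  unfold vpUbA vpUbB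
  rw [PySem.List.pyRange_one 1, PySem.List.pyRange_one 0, PySem.List.min?_id_cons]
  simp only [List.foldl_map, List.map_map, Option.getD_some, Function.comp]
  have hn : (((p.length : Int)) + 1 - 1).toNat = p.length := by omega
  have hn0 : (((p.length : Int)) - 0).toNat = p.length := by omega
  rw [hn, hn0]
  apply List.foldl_ext
  intro ub k hk
  have e1 : (1 + (k : Int)) - 1 = (k : Int) := by ring
  have e2 : ((p.length : Int) + 1) - (1 + (k : Int)) - 1 = (p.length : Int) - 1 - (k : Int) := by
    ring
  simp only [e1, e2, zero_add]
  rw [min_def]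
  split_ifs <;> omega

-- vpStep distributes over append
lemma vpStep_append (K : Int) (L1 L2 : List (List Int)) :
    vpStep K (L1 ++ L2) = vpStep K L1 ++ vpStep K L2 := by
  simp [vpStep]

lemma vpStep_iter_append (K : Int) (g : Nat) (L1 L2 : List (List Int)) :
    (vpStep K)^[g] (L1 ++ L2) = (vpStep K)^[g] L1 ++ (vpStep K)^[g] L2 := by
  induction g generalizing L1 L2 with
  | zero => simp
  | succ g ih => simp [Function.iterate_succ_apply, vpStep_append, ih]

lemma vpStep_iter_flatMap (K : Int) (g : Nat) (L : List (List Int)) :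
    (vpStep K)^[g] L = L.flatMap (fun p => (vpStep K)^[g] [p]) := by
  induction L with
  | nil => induction g with
    | zero => simp
    | succ g ih => simp [Function.iterate_succ_apply, vpStep, ih]
  | cons p rest ih =>
    have : p :: rest = [p] ++ rest := rfl
    rw [this, vpStep_iter_append, ih]; simp

lemma vpRec_eq_iter (K plen : Int) : ∀ (g : Nat) (p : List Int),
    (p.length : Int) + g = plen → vpRec K plen p = (vpStep K)^[g] [p] := by
  intro g
  induction g with
  | zero =>
    intro p h
    rw [vpRec]
    simp at h
    simp [h]
  | succ g ih =>
    intro p h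
    rw [vpRec]
    have hne : ¬ ((p.length : Int) = plen) := by omega
    have hlt : (p.length : Int) < plen := by omega
    rw [if_neg hne, if_pos hlt]
    rw [PySem.List.foldl_append_eq_flatMap]
    have hstep : vpStep K [p] =
        (PySem.List.pyRange 1 (vpUbB K p + 1) 1).map (fun v => p ++ [v]) := by
      simp [vpStep]
    rw [Function.iterate_succ_apply, hstep, ub_eq,
        vpStep_iter_flatMap K g, List.flatMap_map]
    apply List.flatMap_congr  -- pointwise via IH
    intro v _
    rw [ih (p ++ [v]) (by simp; omega)]

lemma vpStep_nil (K : Int) : vpStep K [] = [] := by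
  simp [vpStep]

lemma foldl_step_nil (K : Int) : ∀ l : List Int,
    l.foldl (fun L _ => vpStep K L) [] = [] := by
  intro l
  induction l with
  | nil => rfl
  | cons x rest ih => simpa [vpStep_nil] using ih

-- the early-exit loop computes the plain fold
lemma vpGo_eq_foldl (K : Int) : ∀ (l : List Int) (L : List (List Int)),
    vpGo K l L = l.foldl (fun L _ => vpStep K L) L := by
  intro l
  induction l with
  | nil => intro L; rfl
  | cons x rest ih =>
    intro L
    rw [vpGo]
    by_cases hL : L = []
    · rw [if_pos hL, hL]
      simp [vpStep_nil, foldl_step_nil]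
    · rw [if_neg hL, ih, List.foldl_cons]

-- B's loop over range(plen) is an iterate
lemma foldl_const_iter (K : Int) : ∀ (n : Nat) (L : List (List Int)),
    (List.range n).foldl (fun L _ => vpStep K L) L = (vpStep K)^[n] L := by
  intro n
  induction n with
  | zero => intro L; simp
  | succ n ih =>
    intro L
    rw [List.range_succ, List.foldl_append, ih, Function.iterate_succ_apply']
    simp

-- ===== VERDICT (by name: the statement is the Claim_ definition above) =====
theorem valid_prefixes_spec : Claim_equal_valid_prefixes := by
  intro K plen _ hpre
  unfold Spec_valid_prefixes valid_prefixes valid_prefixes_alt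
  by_cases hp : 0 ≤ plen
  · rw [if_neg (by omega)]
    have h0 : ((([] : List Int).length : Int)) + (plen.toNat : Int) = plen := by
      simp only [List.length_nil, Nat.cast_zero, zero_add]; omega
    rw [vpRec_eq_iter K plen plen.toNat [] h0]
    rw [vpGo_eq_foldl, PySem.List.pyRange_one]
    simp only [List.foldl_map, sub_zero]
    rw [foldl_const_iter]
  · -- plen < 0: A's rec stops immediately with []
    rw [if_pos (by omega : plen < 0), vpRec]
    have h1 : ¬ ((([] : List Int).length : Int) = plen) := by
      simp only [List.length_nil, Nat.cast_zero]; omega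
    have h2 : ¬ ((([] : List Int).length : Int) < plen) := by
      simp only [List.length_nil, Nat.cast_zero]; omega
    rw [if_neg h1, if_neg h2]
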